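-- pv_equiv track=rewrite | github.com/hadityakumar/reverse_geocoding | server/schema.py | derive_event_type
-- ===== SOURCE A (Python) =====
-- FIELD_VALUE_SCHEMA = {
--     "event_type": [
--         'VIOLENT CRIME', 'THEFT & BURGLARY', 'PUBLIC DISTURBANCE', 'FIRE & HAZARDS',
--         'RESCUE OPERATIONS', 'MEDICAL EMERGENCIES', 'TRAFFIC INCIDENTS',
--         'PUBLIC NUISANCE', 'SOCIAL ISSUES', 'MISSING PERSONS',
--         'NATURAL INCIDENTS', 'OTHERS'
--     ],
--     "event_sub_type": {
--         'VIOLENT CRIME': [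
--             'ASSAULT', 'KIDNAPPING', 'BOMB BLAST', 'CHILD ABUSE', 'CRIME AGAINST WOMEN',
--             'ROBBERY', 'DEAD BODY FOUND', 'SUICIDE ATTEMPT', 'MURDER', 'THREAT',
--             'DOMESTIC VIOLENCE', 'VERBAL ABUSE'
--         ],
--         'THEFT & BURGLARY': [
--             'THEFT', 'ATTEMPT OF THEFT', 'HOUSE BREAKING ATTEMPTS', 'VEHICLE THEFT'
--         ],
--         'PUBLIC DISTURBANCE': [
--             'SCUFFLE AMONG STUDENTS', 'DRUNKEN ATROCITIES', 'VERBAL ABUSE', 'GAMBLING',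
--             'NUDITY IN PUBLIC', 'STRIKE', 'GENERAL NUISANCE'
--         ],
--         'FIRE & HAZARDS': [
--             'FIRE', 'ELECTRICAL FIRE', 'BUILDING FIRE', 'LANDSCAPE FIRE', 'VEHICLE FIRE',
--             'GAS LEAKAGE', 'HAZARDOUS CONDITION INCIDENTS'
--         ],
--         'RESCUE OPERATIONS': [
--             'WATER RESCUE', 'WELL RESCUE', 'SEARCH AND RESCUE', 'ROAD CRASH RESCUE'
--         ],
--         'MEDICAL EMERGENCIES': [
--             'BREATHING DIFFICULTIES', 'PERSON COLLAPSED', 'AMBULANCE SERVICE',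
--             'INTER HOSPITAL TRANSFER', 'BLEEDING', 'HEART ATTACK', 'FIRE INJURY'
--         ],
--         'TRAFFIC INCIDENTS': [
--             'HIT & RUN INCIDENTS', 'RASH DRIVING', 'TRAFFIC BLOCK', 'OBSTRUCTIVE PARKING',
--             'VEHICLE BREAK DOWN', 'ACCIDENT', 'RUN OVER INCIDENTS'
--         ],
--         'PUBLIC NUISANCE': [
--             'ILLEGAL MINING', 'ILLEGAL CONSTRUCTIONS', 'GENERAL NUISANCE',
--             'WASTAGE DUMPING ISSUE', 'AIR POLLUTION', 'NOISE POLLUTION',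
--             'TRESPASSING TO PROPERTY'
--         ],
--         'SOCIAL ISSUES': [
--             'FAMILY ISSUES', 'LABOUR/WAGES ISSUES', 'DISPUTES BETWEEN NEIGHBOURS',
--             'LAND BOUNDARY ISSUES', 'ISSUES RELATED TO SENIOR CITIZENS',
--             'MIGRANT LABOURERS ISSUES'
--         ],
--         'MISSING PERSONS': [
--             'MISSING', 'SUSPICIOUSLY FOUND PERSONS OR VEHICLES', 'CHILD LINES'
--         ],
--         'NATURAL INCIDENTS': [
--             'RAINY SEASON INCIDENTS', 'NIZHAL PANIC CALL', 'FLOOD', 'DISASTER',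
--             'EARTHQUAKE', 'LANDSLIDE', 'STRUCTURE COLLAPSE'
--         ],
--         'OTHERS': [
--             'OTHERS', 'SALE OF CONTRABANDS', 'ASSISTANCE FOR HOSPITALIZATION OF CHALLENGED PERSONS',
--             'CYBER CRIME', 'RAILWAY', 'ABANDONED VEHICLES'
--         ]
--     },
--     "state_of_victim": [
--         'Distressed', 'Stable', 'Injured', 'Critical', 'Unconscious', 'Deceased', 'Drunken', 'not specified'
--     ],
--     "victim_gender": [
--         'male', 'female', 'not specified'
--     ]
-- }
--
-- def derive_event_type(sub_type: str) -> str: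
--     """Derive event_type from event_sub_type, handling 'OTHERS' specially."""
--     sub_type_upper = sub_type.upper()
--
--     # If the sub_type is "OTHERS" (meaning it was originally "OTHERS: <label>" or just "OTHERS"),
--     # then its event_type is always "OTHERS".
--     if sub_type_upper == 'OTHERS':
--         return 'OTHERS'
--
--     for event_type_key, sub_types_list in FIELD_VALUE_SCHEMA['event_sub_type'].items():
--         if sub_type_upper in [st.upper() for st in sub_types_list]:
--             return event_type_key
--
--     # Fallback for any sub_type not found (should ideally not happen with good LLM output)
--     return 'OTHERS'
-- ===== SOURCE B (Python) =====
-- # B: hard-coded flat reverse map (first owning event_type for each subtype) + one dict lookup.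
-- REVERSE = {
--     'ASSAULT': 'VIOLENT CRIME',
--     'KIDNAPPING': 'VIOLENT CRIME',
--     'BOMB BLAST': 'VIOLENT CRIME',
--     'CHILD ABUSE': 'VIOLENT CRIME',
--     'CRIME AGAINST WOMEN': 'VIOLENT CRIME',
--     'ROBBERY': 'VIOLENT CRIME',
--     'DEAD BODY FOUND': 'VIOLENT CRIME',
--     'SUICIDE ATTEMPT': 'VIOLENT CRIME',
--     'MURDER': 'VIOLENT CRIME',
--     'THREAT': 'VIOLENT CRIME',
--     'DOMESTIC VIOLENCE': 'VIOLENT CRIME',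
--     'VERBAL ABUSE': 'VIOLENT CRIME',
--     'THEFT': 'THEFT & BURGLARY',
--     'ATTEMPT OF THEFT': 'THEFT & BURGLARY',
--     'HOUSE BREAKING ATTEMPTS': 'THEFT & BURGLARY',
--     'VEHICLE THEFT': 'THEFT & BURGLARY',
--     'SCUFFLE AMONG STUDENTS': 'PUBLIC DISTURBANCE',
--     'DRUNKEN ATROCITIES': 'PUBLIC DISTURBANCE',
--     'GAMBLING': 'PUBLIC DISTURBANCE',
--     'NUDITY IN PUBLIC': 'PUBLIC DISTURBANCE',
--     'STRIKE': 'PUBLIC DISTURBANCE',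
--     'GENERAL NUISANCE': 'PUBLIC DISTURBANCE',
--     'FIRE': 'FIRE & HAZARDS',
--     'ELECTRICAL FIRE': 'FIRE & HAZARDS',
--     'BUILDING FIRE': 'FIRE & HAZARDS',
--     'LANDSCAPE FIRE': 'FIRE & HAZARDS',
--     'VEHICLE FIRE': 'FIRE & HAZARDS',
--     'GAS LEAKAGE': 'FIRE & HAZARDS',
--     'HAZARDOUS CONDITION INCIDENTS': 'FIRE & HAZARDS',
--     'WATER RESCUE': 'RESCUE OPERATIONS',
--     'WELL RESCUE': 'RESCUE OPERATIONS',
--     'SEARCH AND RESCUE': 'RESCUE OPERATIONS',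
--     'ROAD CRASH RESCUE': 'RESCUE OPERATIONS',
--     'BREATHING DIFFICULTIES': 'MEDICAL EMERGENCIES',
--     'PERSON COLLAPSED': 'MEDICAL EMERGENCIES',
--     'AMBULANCE SERVICE': 'MEDICAL EMERGENCIES',
--     'INTER HOSPITAL TRANSFER': 'MEDICAL EMERGENCIES',
--     'BLEEDING': 'MEDICAL EMERGENCIES',
--     'HEART ATTACK': 'MEDICAL EMERGENCIES',
--     'FIRE INJURY': 'MEDICAL EMERGENCIES',
--     'HIT & RUN INCIDENTS': 'TRAFFIC INCIDENTS',
--     'RASH DRIVING': 'TRAFFIC INCIDENTS',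
--     'TRAFFIC BLOCK': 'TRAFFIC INCIDENTS',
--     'OBSTRUCTIVE PARKING': 'TRAFFIC INCIDENTS',
--     'VEHICLE BREAK DOWN': 'TRAFFIC INCIDENTS',
--     'ACCIDENT': 'TRAFFIC INCIDENTS',
--     'RUN OVER INCIDENTS': 'TRAFFIC INCIDENTS',
--     'ILLEGAL MINING': 'PUBLIC NUISANCE',
--     'ILLEGAL CONSTRUCTIONS': 'PUBLIC NUISANCE',
--     'WASTAGE DUMPING ISSUE': 'PUBLIC NUISANCE',
--     'AIR POLLUTION': 'PUBLIC NUISANCE',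
--     'NOISE POLLUTION': 'PUBLIC NUISANCE',
--     'TRESPASSING TO PROPERTY': 'PUBLIC NUISANCE',
--     'FAMILY ISSUES': 'SOCIAL ISSUES',
--     'LABOUR/WAGES ISSUES': 'SOCIAL ISSUES',
--     'DISPUTES BETWEEN NEIGHBOURS': 'SOCIAL ISSUES',
--     'LAND BOUNDARY ISSUES': 'SOCIAL ISSUES',
--     'ISSUES RELATED TO SENIOR CITIZENS': 'SOCIAL ISSUES',
--     'MIGRANT LABOURERS ISSUES': 'SOCIAL ISSUES',
--     'MISSING': 'MISSING PERSONS',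
--     'SUSPICIOUSLY FOUND PERSONS OR VEHICLES': 'MISSING PERSONS',
--     'CHILD LINES': 'MISSING PERSONS',
--     'RAINY SEASON INCIDENTS': 'NATURAL INCIDENTS',
--     'NIZHAL PANIC CALL': 'NATURAL INCIDENTS',
--     'FLOOD': 'NATURAL INCIDENTS',
--     'DISASTER': 'NATURAL INCIDENTS',
--     'EARTHQUAKE': 'NATURAL INCIDENTS',
--     'LANDSLIDE': 'NATURAL INCIDENTS',
--     'STRUCTURE COLLAPSE': 'NATURAL INCIDENTS',
--     'OTHERS': 'OTHERS',
--     'SALE OF CONTRABANDS': 'OTHERS',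
--     'ASSISTANCE FOR HOSPITALIZATION OF CHALLENGED PERSONS': 'OTHERS',
--     'CYBER CRIME': 'OTHERS',
--     'RAILWAY': 'OTHERS',
--     'ABANDONED VEHICLES': 'OTHERS',
-- }
--
--
-- def derive_event_type(sub_type: str) -> str:
--     """Derive event_type from event_sub_type via a flat reverse map."""
--     return REVERSE.get(sub_type.upper(), 'OTHERS')
-- ===== Notes on version B (the rewrite author's own statement) =====
-- stated objective: simpler
-- what changed: Replaces A's per-call scan over the grouped schema (rebuilding each uppercased subtype list on every call) with a hard-coded flat reverse dict mapping each subtype to its first owning event_type, so the function body is a single dict lookup with the fallback category as default; A's special-case first branch disappears.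
import Mathlib
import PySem

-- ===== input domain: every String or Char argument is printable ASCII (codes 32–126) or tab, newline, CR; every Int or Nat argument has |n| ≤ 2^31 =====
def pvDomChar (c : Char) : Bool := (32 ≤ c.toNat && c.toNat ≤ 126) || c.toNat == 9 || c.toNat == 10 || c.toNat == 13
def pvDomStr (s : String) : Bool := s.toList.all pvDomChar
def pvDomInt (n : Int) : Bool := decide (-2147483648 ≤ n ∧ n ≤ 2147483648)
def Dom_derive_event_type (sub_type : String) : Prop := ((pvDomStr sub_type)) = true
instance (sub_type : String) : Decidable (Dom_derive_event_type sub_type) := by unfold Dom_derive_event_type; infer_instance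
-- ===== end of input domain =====

-- B replaces A's per-call scan over the grouped schema (rebuilding uppercased subtype lists)
-- with a hard-coded flat reverse dict (first owning event_type per subtype) and one lookup; objective: simpler.

-- ===== PORT A =====
-- FIELD_VALUE_SCHEMA['event_sub_type'].items(), module data of A
def pvSchema : List (String × List String) :=
  [("VIOLENT CRIME",
    ["ASSAULT", "KIDNAPPING", "BOMB BLAST", "CHILD ABUSE", "CRIME AGAINST WOMEN",
     "ROBBERY", "DEAD BODY FOUND", "SUICIDE ATTEMPT", "MURDER", "THREAT",
     "DOMESTIC VIOLENCE", "VERBAL ABUSE"]),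
   ("THEFT & BURGLARY",
    ["THEFT", "ATTEMPT OF THEFT", "HOUSE BREAKING ATTEMPTS", "VEHICLE THEFT"]),
   ("PUBLIC DISTURBANCE",
    ["SCUFFLE AMONG STUDENTS", "DRUNKEN ATROCITIES", "VERBAL ABUSE", "GAMBLING",
     "NUDITY IN PUBLIC", "STRIKE", "GENERAL NUISANCE"]),
   ("FIRE & HAZARDS",
    ["FIRE", "ELECTRICAL FIRE", "BUILDING FIRE", "LANDSCAPE FIRE", "VEHICLE FIRE",
     "GAS LEAKAGE", "HAZARDOUS CONDITION INCIDENTS"]),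
   ("RESCUE OPERATIONS",
    ["WATER RESCUE", "WELL RESCUE", "SEARCH AND RESCUE", "ROAD CRASH RESCUE"]),
   ("MEDICAL EMERGENCIES",
    ["BREATHING DIFFICULTIES", "PERSON COLLAPSED", "AMBULANCE SERVICE",
     "INTER HOSPITAL TRANSFER", "BLEEDING", "HEART ATTACK", "FIRE INJURY"]),
   ("TRAFFIC INCIDENTS",
    ["HIT & RUN INCIDENTS", "RASH DRIVING", "TRAFFIC BLOCK", "OBSTRUCTIVE PARKING",
     "VEHICLE BREAK DOWN", "ACCIDENT", "RUN OVER INCIDENTS"]),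
   ("PUBLIC NUISANCE",
    ["ILLEGAL MINING", "ILLEGAL CONSTRUCTIONS", "GENERAL NUISANCE",
     "WASTAGE DUMPING ISSUE", "AIR POLLUTION", "NOISE POLLUTION",
     "TRESPASSING TO PROPERTY"]),
   ("SOCIAL ISSUES",
    ["FAMILY ISSUES", "LABOUR/WAGES ISSUES", "DISPUTES BETWEEN NEIGHBOURS",
     "LAND BOUNDARY ISSUES", "ISSUES RELATED TO SENIOR CITIZENS",
     "MIGRANT LABOURERS ISSUES"]),
   ("MISSING PERSONS",
    ["MISSING", "SUSPICIOUSLY FOUND PERSONS OR VEHICLES", "CHILD LINES"]),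
   ("NATURAL INCIDENTS",
    ["RAINY SEASON INCIDENTS", "NIZHAL PANIC CALL", "FLOOD", "DISASTER",
     "EARTHQUAKE", "LANDSLIDE", "STRUCTURE COLLAPSE"]),
   ("OTHERS",
    ["OTHERS", "SALE OF CONTRABANDS", "ASSISTANCE FOR HOSPITALIZATION OF CHALLENGED PERSONS",
     "CYBER CRIME", "RAILWAY", "ABANDONED VEHICLES"])]

-- A's for-loop over .items(): first event_type whose uppercased subtype list contains sub_type_upper
def pvLoopA (u : String) : List (String × List String) → String
  | [] => "OTHERS"
  | (event_type_key, sub_types_list) :: rest =>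
      if (sub_types_list.map PySem.Str.upper).contains u then event_type_key
      else pvLoopA u rest

def derive_event_type (sub_type : String) : String :=
  let sub_type_upper := PySem.Str.upper sub_type
  if sub_type_upper = "OTHERS" then "OTHERS"
  else pvLoopA sub_type_upper pvSchema

-- ===== PORT B =====
-- Source B's REVERSE: a hard-coded flat dict, subtype -> first owning event_type
def pvReverse : PySem.Dict String String :=
  PySem.Dict.mk
    [("ASSAULT", "VIOLENT CRIME"),
     ("KIDNAPPING", "VIOLENT CRIME"),
     ("BOMB BLAST", "VIOLENT CRIME"),
     ("CHILD ABUSE", "VIOLENT CRIME"),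
     ("CRIME AGAINST WOMEN", "VIOLENT CRIME"),
     ("ROBBERY", "VIOLENT CRIME"),
     ("DEAD BODY FOUND", "VIOLENT CRIME"),
     ("SUICIDE ATTEMPT", "VIOLENT CRIME"),
     ("MURDER", "VIOLENT CRIME"),
     ("THREAT", "VIOLENT CRIME"),
     ("DOMESTIC VIOLENCE", "VIOLENT CRIME"),
     ("VERBAL ABUSE", "VIOLENT CRIME"),
     ("THEFT", "THEFT & BURGLARY"),
     ("ATTEMPT OF THEFT", "THEFT & BURGLARY"),
     ("HOUSE BREAKING ATTEMPTS", "THEFT & BURGLARY"),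
     ("VEHICLE THEFT", "THEFT & BURGLARY"),
     ("SCUFFLE AMONG STUDENTS", "PUBLIC DISTURBANCE"),
     ("DRUNKEN ATROCITIES", "PUBLIC DISTURBANCE"),
     ("GAMBLING", "PUBLIC DISTURBANCE"),
     ("NUDITY IN PUBLIC", "PUBLIC DISTURBANCE"),
     ("STRIKE", "PUBLIC DISTURBANCE"),
     ("GENERAL NUISANCE", "PUBLIC DISTURBANCE"),
     ("FIRE", "FIRE & HAZARDS"),
     ("ELECTRICAL FIRE", "FIRE & HAZARDS"),
     ("BUILDING FIRE", "FIRE & HAZARDS"),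
     ("LANDSCAPE FIRE", "FIRE & HAZARDS"),
     ("VEHICLE FIRE", "FIRE & HAZARDS"),
     ("GAS LEAKAGE", "FIRE & HAZARDS"),
     ("HAZARDOUS CONDITION INCIDENTS", "FIRE & HAZARDS"),
     ("WATER RESCUE", "RESCUE OPERATIONS"),
     ("WELL RESCUE", "RESCUE OPERATIONS"),
     ("SEARCH AND RESCUE", "RESCUE OPERATIONS"),
     ("ROAD CRASH RESCUE", "RESCUE OPERATIONS"),
     ("BREATHING DIFFICULTIES", "MEDICAL EMERGENCIES"),
     ("PERSON COLLAPSED", "MEDICAL EMERGENCIES"),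
     ("AMBULANCE SERVICE", "MEDICAL EMERGENCIES"),
     ("INTER HOSPITAL TRANSFER", "MEDICAL EMERGENCIES"),
     ("BLEEDING", "MEDICAL EMERGENCIES"),
     ("HEART ATTACK", "MEDICAL EMERGENCIES"),
     ("FIRE INJURY", "MEDICAL EMERGENCIES"),
     ("HIT & RUN INCIDENTS", "TRAFFIC INCIDENTS"),
     ("RASH DRIVING", "TRAFFIC INCIDENTS"),
     ("TRAFFIC BLOCK", "TRAFFIC INCIDENTS"),
     ("OBSTRUCTIVE PARKING", "TRAFFIC INCIDENTS"),
     ("VEHICLE BREAK DOWN", "TRAFFIC INCIDENTS"),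
     ("ACCIDENT", "TRAFFIC INCIDENTS"),
     ("RUN OVER INCIDENTS", "TRAFFIC INCIDENTS"),
     ("ILLEGAL MINING", "PUBLIC NUISANCE"),
     ("ILLEGAL CONSTRUCTIONS", "PUBLIC NUISANCE"),
     ("WASTAGE DUMPING ISSUE", "PUBLIC NUISANCE"),
     ("AIR POLLUTION", "PUBLIC NUISANCE"),
     ("NOISE POLLUTION", "PUBLIC NUISANCE"),
     ("TRESPASSING TO PROPERTY", "PUBLIC NUISANCE"),
     ("FAMILY ISSUES", "SOCIAL ISSUES"),
     ("LABOUR/WAGES ISSUES", "SOCIAL ISSUES"),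
     ("DISPUTES BETWEEN NEIGHBOURS", "SOCIAL ISSUES"),
     ("LAND BOUNDARY ISSUES", "SOCIAL ISSUES"),
     ("ISSUES RELATED TO SENIOR CITIZENS", "SOCIAL ISSUES"),
     ("MIGRANT LABOURERS ISSUES", "SOCIAL ISSUES"),
     ("MISSING", "MISSING PERSONS"),
     ("SUSPICIOUSLY FOUND PERSONS OR VEHICLES", "MISSING PERSONS"),
     ("CHILD LINES", "MISSING PERSONS"),
     ("RAINY SEASON INCIDENTS", "NATURAL INCIDENTS"),
     ("NIZHAL PANIC CALL", "NATURAL INCIDENTS"),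
     ("FLOOD", "NATURAL INCIDENTS"),
     ("DISASTER", "NATURAL INCIDENTS"),
     ("EARTHQUAKE", "NATURAL INCIDENTS"),
     ("LANDSLIDE", "NATURAL INCIDENTS"),
     ("STRUCTURE COLLAPSE", "NATURAL INCIDENTS"),
     ("OTHERS", "OTHERS"),
     ("SALE OF CONTRABANDS", "OTHERS"),
     ("ASSISTANCE FOR HOSPITALIZATION OF CHALLENGED PERSONS", "OTHERS"),
     ("CYBER CRIME", "OTHERS"),
     ("RAILWAY", "OTHERS"),
     ("ABANDONED VEHICLES", "OTHERS")]

def derive_event_type_alt (sub_type : String) : String :=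
  PySem.Dict.getD pvReverse (PySem.Str.upper sub_type) "OTHERS"

-- ===== PRECONDITION & SPEC =====
def Spec_derive_event_type (sub_type : String) (out : String) : Prop := out = derive_event_type_alt sub_type
instance (sub_type : String) (out : String) : Decidable (Spec_derive_event_type sub_type out) := by unfold Spec_derive_event_type; infer_instance

-- ===== CLAIM (what is proved, stated in full; the proofs are below) =====
def Claim_equal_derive_event_type : Prop := ∀ (sub_type : String), Dom_derive_event_type sub_type → Spec_derive_event_type sub_type (derive_event_type sub_type)

-- ===== LEMMAS AND PROOFS =====

-- every uppercased subtype occurring anywhere in A's schema (with duplicates, in scan order)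
def pvAllKeys : List String :=
  ["ASSAULT",
   "KIDNAPPING",
   "BOMB BLAST",
   "CHILD ABUSE",
   "CRIME AGAINST WOMEN",
   "ROBBERY",
   "DEAD BODY FOUND",
   "SUICIDE ATTEMPT",
   "MURDER",
   "THREAT",
   "DOMESTIC VIOLENCE",
   "VERBAL ABUSE",
   "THEFT",
   "ATTEMPT OF THEFT",
   "HOUSE BREAKING ATTEMPTS",
   "VEHICLE THEFT",
   "SCUFFLE AMONG STUDENTS",
   "DRUNKEN ATROCITIES",
   "VERBAL ABUSE",
   "GAMBLING",
   "NUDITY IN PUBLIC",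
   "STRIKE",
   "GENERAL NUISANCE",
   "FIRE",
   "ELECTRICAL FIRE",
   "BUILDING FIRE",
   "LANDSCAPE FIRE",
   "VEHICLE FIRE",
   "GAS LEAKAGE",
   "HAZARDOUS CONDITION INCIDENTS",
   "WATER RESCUE",
   "WELL RESCUE",
   "SEARCH AND RESCUE",
   "ROAD CRASH RESCUE",
   "BREATHING DIFFICULTIES",
   "PERSON COLLAPSED",
   "AMBULANCE SERVICE",
   "INTER HOSPITAL TRANSFER",
   "BLEEDING",
   "HEART ATTACK",
   "FIRE INJURY",
   "HIT & RUN INCIDENTS",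
   "RASH DRIVING",
   "TRAFFIC BLOCK",
   "OBSTRUCTIVE PARKING",
   "VEHICLE BREAK DOWN",
   "ACCIDENT",
   "RUN OVER INCIDENTS",
   "ILLEGAL MINING",
   "ILLEGAL CONSTRUCTIONS",
   "GENERAL NUISANCE",
   "WASTAGE DUMPING ISSUE",
   "AIR POLLUTION",
   "NOISE POLLUTION",
   "TRESPASSING TO PROPERTY",
   "FAMILY ISSUES",
   "LABOUR/WAGES ISSUES",
   "DISPUTES BETWEEN NEIGHBOURS",
   "LAND BOUNDARY ISSUES",
   "ISSUES RELATED TO SENIOR CITIZENS",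
   "MIGRANT LABOURERS ISSUES",
   "MISSING",
   "SUSPICIOUSLY FOUND PERSONS OR VEHICLES",
   "CHILD LINES",
   "RAINY SEASON INCIDENTS",
   "NIZHAL PANIC CALL",
   "FLOOD",
   "DISASTER",
   "EARTHQUAKE",
   "LANDSLIDE",
   "STRUCTURE COLLAPSE",
   "OTHERS",
   "SALE OF CONTRABANDS",
   "ASSISTANCE FOR HOSPITALIZATION OF CHALLENGED PERSONS",
   "CYBER CRIME",
   "RAILWAY",
   "ABANDONED VEHICLES"]

-- on every key of the schema the two computations agree (checked by evaluation)
set_option maxRecDepth 100000 in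
theorem pv_agree_on_keys :
    (pvAllKeys.all (fun u =>
      (if u = "OTHERS" then "OTHERS" else pvLoopA u pvSchema) ==
        PySem.Dict.getD pvReverse u "OTHERS")) = true := by rfl

-- pvAllKeys covers the uppercased subtype lists of the schema (checked by evaluation)
theorem pv_keys_cover :
    (pvSchema.all (fun p => p.2.all (fun st => pvAllKeys.contains (PySem.Str.upper st)))) = true := by rfl

-- pvAllKeys covers the keys of B's flat dict (checked by evaluation)
theorem pv_keys_cover_rev :
    (pvReverse.items.all (fun p => pvAllKeys.contains p.1)) = true := by rfl

-- A's scan falls through to "OTHERS" when u is in none of the uppercased lists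
theorem pvLoopA_eq_others (u : String) (l : List (String × List String))
    (h : ∀ p ∈ l, u ∉ p.2.map PySem.Str.upper) : pvLoopA u l = "OTHERS" := by
  induction l with
  | nil => rfl
  | cons p rest ih =>
      obtain ⟨k, sts⟩ := p
      have h1 : u ∉ sts.map PySem.Str.upper := h (k, sts) (by simp)
      simp only [pvLoopA]
      rw [if_neg (by simpa using h1)]
      exact ih (fun q hq => h q (List.mem_cons_of_mem _ hq))

theorem pv_core (u : String) :
    (if u = "OTHERS" then "OTHERS" else pvLoopA u pvSchema) =
      PySem.Dict.getD pvReverse u "OTHERS" := by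
  by_cases hu : u ∈ pvAllKeys
  · have h := List.all_eq_true.mp pv_agree_on_keys u hu
    exact eq_of_beq h
  · -- u is no schema key: A falls through and B's lookup misses
    have hA : pvLoopA u pvSchema = "OTHERS" := by
      apply pvLoopA_eq_others
      intro p hp hmem
      rcases List.mem_map.mp hmem with ⟨st, hst, hup⟩
      have h1 := List.all_eq_true.mp pv_keys_cover p hp
      have h2 := List.all_eq_true.mp h1 st hst
      rw [hup] at h2
      exact hu (by simpa using h2)
    have hfind : List.find? (fun p => p.1 == u) pvReverse.items = none := by
      apply List.find?_eq_none.mpr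
      intro p hp hbeq
      have h1 := List.all_eq_true.mp pv_keys_cover_rev p hp
      have : p.1 = u := by simpa using hbeq
      rw [this] at h1
      exact hu (by simpa using h1)
    have hB : pvReverse.get? u = none := by
      unfold PySem.Dict.get?
      rw [hfind]
      rfl
    have hne : u ≠ "OTHERS" := by
      intro h; apply hu; rw [h]; decide
    rw [if_neg hne, hA]
    simp [PySem.Dict.getD, hB]

-- ===== VERDICT (by name: the statement is the Claim_ definition above) =====
theorem derive_event_type_spec : Claim_equal_derive_event_type := by
  intro s _
  show derive_event_type s = derive_event_type_alt s
  unfold derive_event_type derive_event_type_alt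
  simpa [PySem.Dict.getD] using pv_core (PySem.Str.upper s)
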